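-- pv_equiv track=rewrite | github.com/pindia/caylus | config.py | format_resources
-- ===== SOURCE A (Python) =====
-- def format_resources(resources):
--     out = []
--     for resource, amount in resources.items():
--         if resource == 'money':
--             out += [str(amount)]
--         else:
--             out += [resource[0].upper()] * amount
--     out.sort()
--     return ''.join(out)
-- ===== SOURCE B (Python) =====
-- def format_resources(resources):
--     chunks = {}
--     for resource, amount in resources.items():
--         if resource == 'money':
--             token, piece = str(amount), str(amount)
--         else:
--             token = resource[0].upper()
--             piece = token * amount
--         chunks[token] = chunks.get(token, '') + piece
--     return ''.join(chunks[token] for token in sorted(chunks))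
-- ===== Notes on version B (the rewrite author's own statement) =====
-- stated objective: alternative
-- what changed: Instead of expanding every resource into a flat list of tokens and sorting the whole expanded list, B groups the expansions in a token->chunk dict in one pass, sorts only the distinct tokens and concatenates each token's chunk; Pre_ excludes only inputs on which A raises IndexError, namely a non-money resource name with no characters to index.
import Mathlib
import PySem

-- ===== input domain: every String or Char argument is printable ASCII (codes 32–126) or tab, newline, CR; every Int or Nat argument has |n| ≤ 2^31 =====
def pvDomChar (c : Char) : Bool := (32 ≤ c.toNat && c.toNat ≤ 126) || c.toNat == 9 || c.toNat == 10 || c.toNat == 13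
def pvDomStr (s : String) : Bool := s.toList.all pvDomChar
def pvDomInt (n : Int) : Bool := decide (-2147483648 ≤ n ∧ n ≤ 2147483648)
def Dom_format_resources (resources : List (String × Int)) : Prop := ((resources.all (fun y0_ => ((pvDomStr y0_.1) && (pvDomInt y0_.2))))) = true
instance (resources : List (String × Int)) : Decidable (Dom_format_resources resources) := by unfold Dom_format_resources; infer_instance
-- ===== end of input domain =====

-- B replaces A's expand-every-token-then-sort-the-whole-list by a one-pass token->chunk
-- dict: sort only the distinct tokens and concatenate each token's accumulated chunk.

-- ===== PORT A =====
-- port of `resource[0].upper()` (a subexpression both sources contain); Python raises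
-- IndexError on an empty string — Pre_ excludes that, so the `none` arm is never reached
def pyUpperFirst (s : String) : String :=
  match PySem.Str.pyGet? s 0 with
  | some c => String.ofList (PySem.Chars.upper [c])
  | none => ""

def format_resources (resources : List (String × Int)) : String :=
  PySem.Str.join ""
    (PySem.List.sorted
      ((PySem.Dict.ofList resources).items.foldl (fun out p =>
        if p.1 == "money" then out ++ [PySem.Int.toStr p.2]
        else out ++ PySem.List.pyRepeat [pyUpperFirst p.1] p.2) [])
      (fun x => x) false)

-- ===== PORT B =====
-- the `token, piece = …` pair of Source B; string repetition `token * amount` is ported as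
-- PySem.List.pyRepeat on the character list — exact (negative count gives the empty string)
def pvTP (p : String × Int) : String × String :=
  if p.1 == "money" then (PySem.Int.toStr p.2, PySem.Int.toStr p.2)
  else (pyUpperFirst p.1, String.ofList (PySem.List.pyRepeat (pyUpperFirst p.1).toList p.2))

-- the `chunks` dict Source B builds in its loop
def pvChunksOf (l : List (String × Int)) : PySem.Dict String String :=
  l.foldl (fun d p => d.insert (pvTP p).1 (d.getD (pvTP p).1 "" ++ (pvTP p).2)) PySem.Dict.empty

def format_resources_alt (resources : List (String × Int)) : String :=
  PySem.Str.join ""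
    ((PySem.List.sorted (pvChunksOf (PySem.Dict.ofList resources).items).keys (fun x => x) false).map
      (fun tok => (pvChunksOf (PySem.Dict.ofList resources).items).getD tok ""))

-- ===== PRECONDITION & SPEC =====
-- Pre_ excludes exactly the inputs where Python A raises: a non-'money' key that is the
-- empty string makes `resource[0]` an IndexError (B raises there too).
def Pre_format_resources (resources : List (String × Int)) : Prop :=
  ∀ p ∈ resources, p.1 ≠ ""
instance (resources : List (String × Int)) : Decidable (Pre_format_resources resources) := by
  unfold Pre_format_resources; infer_instance
def pvWitness_format_resources : (List (String × Int)) := [("wood", 2), ("money", 5), ("wine", -1)]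

def Spec_format_resources (resources : List (String × Int)) (out : String) : Prop := out = format_resources_alt resources
instance (resources : List (String × Int)) (out : String) : Decidable (Spec_format_resources resources out) := by unfold Spec_format_resources; infer_instance

-- ===== CLAIM (what is proved, stated in full; the proofs are below) =====
def Claim_equal_format_resources : Prop := ∀ (resources : List (String × Int)), Dom_format_resources resources → Pre_format_resources resources → Spec_format_resources resources (format_resources resources)

-- ===== LEMMAS AND PROOFS =====

-- the tokens A expands a single (resource, amount) item into
def pvBlock (p : String × Int) : List String :=
  if p.1 == "money" then [PySem.Int.toStr p.2]
  else PySem.List.pyRepeat [pyUpperFirst p.1] p.2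

theorem pvA_out_eq (l : List (String × Int)) :
    l.foldl (fun out p =>
      if p.1 == "money" then out ++ [PySem.Int.toStr p.2]
      else out ++ PySem.List.pyRepeat [pyUpperFirst p.1] p.2) [] = l.flatMap pvBlock := by
  have h : ∀ (out : List String) (p : String × Int),
      (if p.1 == "money" then out ++ [PySem.Int.toStr p.2]
       else out ++ PySem.List.pyRepeat [pyUpperFirst p.1] p.2) = out ++ pvBlock p := by
    intro out p; unfold pvBlock; split <;> rfl
  simp only [h]
  simpa using PySem.List.foldl_append_eq_flatMap pvBlock l []

-- every token A expands an item into is that item's grouping key in B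
theorem pvBlock_mem (p : String × Int) (t : String) (h : t ∈ pvBlock p) : t = (pvTP p).1 := by
  unfold pvBlock pvTP at *
  by_cases hm : p.1 == "money"
  · rw [if_pos hm] at h ⊢; exact List.mem_singleton.mp h
  · rw [if_neg hm] at h ⊢
    rw [PySem.List.pyRepeat_singleton] at h
    exact List.eq_of_mem_replicate h

-- an item's chunk piece is its token repeated as many times as it occurs in A's block
theorem pvPiece_eq (p : String × Int) :
    ((pvTP p).2).toList
      = (List.replicate ((pvBlock p).count (pvTP p).1) ((pvTP p).1).toList).flatten := by
  unfold pvBlock pvTP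
  by_cases hm : p.1 == "money"
  · rw [if_pos hm, if_pos hm]
    simp
  · rw [if_neg hm, if_neg hm]
    simp only [PySem.List.pyRepeat_singleton, List.count_replicate, if_pos (beq_self_eq_true _),
      String.toList_ofList]
    simp [PySem.List.pyRepeat]

theorem pvBlock_count_ne (p : String × Int) (t : String) (h : t ≠ (pvTP p).1) :
    (pvBlock p).count t = 0 := by
  rw [List.count_eq_zero]
  exact fun hm => h (pvBlock_mem p t hm)

-- the chunk accumulated for token t is t's characters repeated (count of t in A's list) times
theorem pvChunks_getD (l : List (String × Int)) (d : PySem.Dict String String) (t : String) :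
    ((l.foldl (fun d p => d.insert (pvTP p).1 (d.getD (pvTP p).1 "" ++ (pvTP p).2)) d).getD t "").toList
      = (d.getD t "").toList
        ++ (List.replicate ((l.flatMap pvBlock).count t) t.toList).flatten := by
  induction l generalizing d with
  | nil => simp
  | cons p l ih =>
    rw [List.foldl_cons, ih, List.flatMap_cons, List.count_append, PySem.Dict.getD_insert,
      List.replicate_add, List.flatten_append]
    by_cases ht : t = (pvTP p).1
    · rw [if_pos ht]
      subst ht
      rw [String.toList_append, pvPiece_eq, List.append_assoc]
    · rw [if_neg ht, pvBlock_count_ne p t ht]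
      simp

theorem pvMem_keys_of_mem_toks (l : List (String × Int)) (t : String)
    (h : t ∈ l.flatMap pvBlock) : t ∈ (pvChunksOf l).keys := by
  rcases List.mem_flatMap.mp h with ⟨p, hp, hb⟩
  unfold pvChunksOf
  rw [PySem.Dict.keys_foldl_insert_key l (fun p => (pvTP p).1)
    (fun d p => d.getD (pvTP p).1 "" ++ (pvTP p).2) PySem.Dict.empty]
  exact (PySem.Set.mem_update _ _ _).mpr (Or.inr (List.mem_map.mpr ⟨p, hp, (pvBlock_mem p t hb).symm⟩))

theorem pvCount_flatMap_replicate (ks : List String) (cnt : String → Nat) (u : String)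
    (hn : ks.Nodup) :
    (ks.flatMap fun t => List.replicate (cnt t) t).count u = if u ∈ ks then cnt u else 0 := by
  induction ks with
  | nil => simp
  | cons k ks ih =>
    rcases List.nodup_cons.mp hn with ⟨hk, hks⟩
    rw [List.flatMap_cons, List.count_append, ih hks, List.count_replicate]
    by_cases hu : u = k
    · subst hu
      rw [if_pos (beq_self_eq_true u), if_pos (List.mem_cons_self), if_neg hk]
      omega
    · rw [if_neg (fun h => hu (beq_iff_eq.mp h).symm)]
      by_cases hm : u ∈ ks
      · rw [if_pos hm, if_pos (List.mem_cons_of_mem _ hm)]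
        omega
      · rw [if_neg hm, if_neg (by simp [hu, hm])]

theorem pvPairwise_flatMap_replicate (ks : List String) (cnt : String → Nat)
    (h : ks.Pairwise (· ≤ ·)) :
    (ks.flatMap fun t => List.replicate (cnt t) t).Pairwise (· ≤ ·) := by
  induction ks with
  | nil => simp
  | cons k ks ih =>
    rcases List.pairwise_cons.mp h with ⟨hk, hks⟩
    rw [List.flatMap_cons]
    apply List.pairwise_append.mpr
    refine ⟨List.pairwise_replicate.mpr (Or.inr le_rfl), ih hks, ?_⟩
    intro x hx y hy
    rcases List.mem_flatMap.mp hy with ⟨t, ht, hyt⟩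
    rw [List.eq_of_mem_replicate hx, List.eq_of_mem_replicate hyt]
    exact hk t ht

theorem pvCharsJoinCons (c : List Char) (cs : List (List Char)) :
    PySem.Chars.join [] (c :: cs) = c ++ PySem.Chars.join [] cs := by
  cases cs with
  | nil => rw [PySem.Chars.join_singleton, PySem.Chars.join_nil, List.append_nil]
  | cons d ds => rw [PySem.Chars.join_cons_cons]; simp

theorem pvCharsJoinAppend (as bs : List (List Char)) :
    PySem.Chars.join [] (as ++ bs) = PySem.Chars.join [] as ++ PySem.Chars.join [] bs := by
  induction as with
  | nil => rw [List.nil_append, PySem.Chars.join_nil, List.nil_append]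
  | cons a as iha => rw [List.cons_append, pvCharsJoinCons, pvCharsJoinCons, iha,
      List.append_assoc]

-- the join of a sorted flat token list is the join over sorted keys of the per-key chunks
theorem pvJoinChars (xs : List String) :
    (PySem.Str.join "" xs).toList = PySem.Chars.join [] (xs.map String.toList) := by
  have he : ("" : String).toList = [] := rfl
  simp [PySem.Str.toList_join, he]

theorem pvCharsJoinFlat (ks : List String) (cnt : String → Nat) :
    PySem.Chars.join [] ((ks.flatMap fun t => List.replicate (cnt t) t).map String.toList)
      = PySem.Chars.join [] (ks.map (fun t => (List.replicate (cnt t) t.toList).flatten)) := by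
  induction ks with
  | nil => rfl
  | cons k ks ih =>
    rw [List.flatMap_cons, List.map_append, pvCharsJoinAppend, List.map_cons, pvCharsJoinCons, ih]
    congr 1
    induction cnt k with
    | zero => rfl
    | succ n ihn =>
      rw [List.replicate_succ, List.replicate_succ, List.map_cons, pvCharsJoinCons,
        List.flatten_cons, ihn]

-- ===== VERDICT (by name: the statement is the Claim_ definition above) =====
theorem format_resources_spec : Claim_equal_format_resources := by
  unfold Claim_equal_format_resources
  intro resources _ _
  unfold Spec_format_resources format_resources format_resources_alt
  rw [pvA_out_eq]
  set l := (PySem.Dict.ofList resources).items with hl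
  have hKnd : (pvChunksOf l).keys.Nodup := by
    unfold pvChunksOf
    exact PySem.Dict.nodup_keys_foldl_insert_key l (fun p => (pvTP p).1)
      (fun d p => d.getD (pvTP p).1 "" ++ (pvTP p).2) PySem.Dict.empty
      PySem.Dict.nodup_keys_empty
  have hSnd : (PySem.List.sorted (pvChunksOf l).keys (fun x => x) false).Nodup :=
    (PySem.List.sorted_perm (pvChunksOf l).keys (fun x => x) false).nodup_iff.mpr hKnd
  have hget : ∀ t, ((pvChunksOf l).getD t "").toList
      = (List.replicate ((l.flatMap pvBlock).count t) t.toList).flatten := by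
    intro t
    unfold pvChunksOf
    rw [pvChunks_getD]
    simp
  have hsort : PySem.List.sorted (l.flatMap pvBlock) (fun x => x) false
      = (PySem.List.sorted (pvChunksOf l).keys (fun x => x) false).flatMap
          (fun t => List.replicate ((l.flatMap pvBlock).count t) t) := by
    apply PySem.List.sorted_id_eq_of_perm_of_pairwise
    · rw [List.perm_iff_count]
      intro u
      rw [pvCount_flatMap_replicate _ _ _ hSnd]
      by_cases hu : u ∈ (pvChunksOf l).keys
      · rw [if_pos ((PySem.List.mem_sorted _ _ _ _).mpr hu)]
      · rw [if_neg (fun h => hu ((PySem.List.mem_sorted _ _ _ _).mp h))]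
        by_contra hne
        exact hu (pvMem_keys_of_mem_toks l u (List.count_pos_iff.mp (Nat.pos_of_ne_zero
          (fun h0 => hne h0.symm))))
    · exact pvPairwise_flatMap_replicate _ _
        (PySem.List.sorted_pairwise (pvChunksOf l).keys (fun x => x))
  apply String.toList_inj.mp
  rw [hsort, pvJoinChars, pvJoinChars, pvCharsJoinFlat]
  congr 1
  rw [List.map_map]
  apply List.map_congr_left
  intro t _
  exact (hget t).symm
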